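-- pv_equiv track=rewrite | github.com/musculoskeletal/gias3.fieldwork | src/gias3/fieldwork/field/template_fields.py | _four_tri_patch_hemisphere_remapper
-- ===== SOURCE A (Python) =====
-- def _four_tri_patch_hemisphere_remapper(elements):
--     remap = {}
--
--     old_t1 = 0
--     old_t2 = 5
--     old_t3 = 9
--     old_t4 = 12
--
--     new_t1 = 0
--     new_t2 = elements * 4
--     new_t3 = new_t2 + 3 * elements
--     new_t4 = new_t3 + 2 * elements
--
--     # 1st element
--     for old_t1 in range(old_t1, old_t1 + 5):
--         remap[old_t1] = new_t1
--         new_t1 += 1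
--
--     for old_t2 in range(old_t2, old_t2 + 4):
--         remap[old_t2] = new_t2
--         new_t2 += 1
--
--     for old_t3 in range(old_t3, old_t3 + 3):
--         remap[old_t3] = new_t3
--         new_t3 += 1
--
--     for old_t4 in range(old_t4, old_t4 + 2):
--         remap[old_t4] = new_t4
--         new_t4 += 1
--
--     # other elements
--     for e in range(1, elements):
--         old_t1 = 15 + (e - 1) * 10
--         old_t2 = 19 + (e - 1) * 10
--         old_t3 = 22 + (e - 1) * 10
--         old_t4 = 24 + (e - 1) * 10
--
--         if e < elements - 1:
--             for old_t1 in range(old_t1, old_t1 + 4):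
--                 remap[old_t1] = new_t1
--                 new_t1 += 1
--
--             for old_t2 in range(old_t2, old_t2 + 3):
--                 remap[old_t2] = new_t2
--                 new_t2 += 1
--
--             for old_t3 in range(old_t3, old_t3 + 2):
--                 remap[old_t3] = new_t3
--                 new_t3 += 1
--
--             for old_t4 in range(old_t4, old_t4 + 1):
--                 remap[old_t4] = new_t4
--                 new_t4 += 1
--         else:
--             for old_t1 in range(old_t1, old_t1 + 3):
--                 remap[old_t1] = new_t1
--                 new_t1 += 1
--
--             for old_t2 in range(old_t2 - 1, old_t2 + 1):
--                 remap[old_t2] = new_t2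
--                 new_t2 += 1
--
--             for old_t3 in range(old_t3 - 2, old_t3 - 1):
--                 remap[old_t3] = new_t3
--                 new_t3 += 1
--
--     remap[14] = elements * 10
--
--     return remap
-- ===== SOURCE B (Python) =====
-- def _four_tri_patch_hemisphere_remapper(elements):
--     # closed-form new-index bases instead of running counters; pairs gathered
--     # as one list, dict built once at the end
--     items = [(0, 0), (1, 1), (2, 2), (3, 3), (4, 4),
--              (5, 4 * elements), (6, 4 * elements + 1),
--              (7, 4 * elements + 2), (8, 4 * elements + 3),
--              (9, 7 * elements), (10, 7 * elements + 1), (11, 7 * elements + 2),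
--              (12, 9 * elements), (13, 9 * elements + 1)]
--     for e in range(1, elements):
--         b = 10 * (e - 1)
--         t1 = 5 + 4 * (e - 1)
--         t2 = 4 * elements + 4 + 3 * (e - 1)
--         t3 = 7 * elements + 3 + 2 * (e - 1)
--         t4 = 9 * elements + 2 + (e - 1)
--         if e < elements - 1:
--             items += ((15 + b, t1), (16 + b, t1 + 1), (17 + b, t1 + 2), (18 + b, t1 + 3),
--                       (19 + b, t2), (20 + b, t2 + 1), (21 + b, t2 + 2),
--                       (22 + b, t3), (23 + b, t3 + 1),
--                       (24 + b, t4))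
--         else:
--             items += ((15 + b, t1), (16 + b, t1 + 1), (17 + b, t1 + 2),
--                       (18 + b, t2), (19 + b, t2 + 1),
--                       (20 + b, t3))
--     items.append((14, elements * 10))
--     return dict(items)
-- ===== Notes on version B (the rewrite author's own statement) =====
-- stated objective: simpler
-- what changed: A advances four new-index counters simultaneously while inserting into the dict inside nested per-element loops; B computes each new index in closed form from the element number (bases 0, 4e, 7e, 9e plus per-element offsets), gathers all (old, new) pairs as plain list sections, and builds the dict once at the end.
import Mathlib
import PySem

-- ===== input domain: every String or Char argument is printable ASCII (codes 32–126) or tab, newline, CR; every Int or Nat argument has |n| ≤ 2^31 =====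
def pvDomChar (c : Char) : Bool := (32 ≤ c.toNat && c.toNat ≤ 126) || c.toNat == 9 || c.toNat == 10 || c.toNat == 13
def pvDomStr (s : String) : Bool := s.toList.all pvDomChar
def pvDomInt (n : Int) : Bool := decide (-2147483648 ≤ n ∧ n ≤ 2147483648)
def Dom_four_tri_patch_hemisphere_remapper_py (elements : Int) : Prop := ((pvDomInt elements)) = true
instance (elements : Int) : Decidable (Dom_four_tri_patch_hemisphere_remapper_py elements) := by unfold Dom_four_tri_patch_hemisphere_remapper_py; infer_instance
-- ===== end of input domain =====

-- B replaces A's four simultaneously advancing counters by closed-form new-index bases per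
-- element, building the (old, new) pairs as list sections and making one dict at the end (objective: simpler).

-- ===== PORT A =====
-- the body of each of A's inner `for` loops: insert the key with the current counter, bump the counter
def pvIns (p : PySem.Dict Int Int × Int) (k : Int) : PySem.Dict Int Int × Int :=
  (p.1.insert k p.2, p.2 + 1)

-- the body of A's `for e in range(1, elements)` loop
def pvBodyA (elements : Int) (st : PySem.Dict Int Int × Int × Int × Int × Int) (e : Int) :
    PySem.Dict Int Int × Int × Int × Int × Int :=
  let (remap, n1, n2, n3, n4) := st
  let o1 := 15 + (e - 1) * 10
  let o2 := 19 + (e - 1) * 10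
  let o3 := 22 + (e - 1) * 10
  let o4 := 24 + (e - 1) * 10
  if e < elements - 1 then
    let p1 := (PySem.List.pyRange o1 (o1 + 4)).foldl pvIns (remap, n1)
    let p2 := (PySem.List.pyRange o2 (o2 + 3)).foldl pvIns (p1.1, n2)
    let p3 := (PySem.List.pyRange o3 (o3 + 2)).foldl pvIns (p2.1, n3)
    let p4 := (PySem.List.pyRange o4 (o4 + 1)).foldl pvIns (p3.1, n4)
    (p4.1, p1.2, p2.2, p3.2, p4.2)
  else
    let p1 := (PySem.List.pyRange o1 (o1 + 3)).foldl pvIns (remap, n1)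
    let p2 := (PySem.List.pyRange (o2 - 1) (o2 + 1)).foldl pvIns (p1.1, n2)
    let p3 := (PySem.List.pyRange (o3 - 2) (o3 - 1)).foldl pvIns (p2.1, n3)
    (p3.1, p1.2, p2.2, p3.2, n4)

def four_tri_patch_hemisphere_remapper_py (elements : Int) : List (Int × Int) :=
  let remap : PySem.Dict Int Int := PySem.Dict.empty
  let new_t1 : Int := 0
  let new_t2 : Int := elements * 4
  let new_t3 : Int := new_t2 + 3 * elements
  let new_t4 : Int := new_t3 + 2 * elements
  -- 1st element
  let p1 := (PySem.List.pyRange 0 (0 + 5)).foldl pvIns (remap, new_t1)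
  let p2 := (PySem.List.pyRange 5 (5 + 4)).foldl pvIns (p1.1, new_t2)
  let p3 := (PySem.List.pyRange 9 (9 + 3)).foldl pvIns (p2.1, new_t3)
  let p4 := (PySem.List.pyRange 12 (12 + 2)).foldl pvIns (p3.1, new_t4)
  -- other elements
  let st := (PySem.List.pyRange 1 elements).foldl (pvBodyA elements) (p4.1, p1.2, p2.2, p3.2, p4.2)
  (st.1.insert 14 (elements * 10)).items

-- ===== PORT B =====
def four_tri_patch_hemisphere_remapper_py_alt (elements : Int) : List (Int × Int) :=
  let items : List (Int × Int) :=
    [(0, 0), (1, 1), (2, 2), (3, 3), (4, 4),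
     (5, 4 * elements), (6, 4 * elements + 1), (7, 4 * elements + 2), (8, 4 * elements + 3),
     (9, 7 * elements), (10, 7 * elements + 1), (11, 7 * elements + 2),
     (12, 9 * elements), (13, 9 * elements + 1)]
  let items := (PySem.List.pyRange 1 elements).foldl (fun acc e =>
    let b := 10 * (e - 1)
    let t1 := 5 + 4 * (e - 1)
    let t2 := 4 * elements + 4 + 3 * (e - 1)
    let t3 := 7 * elements + 3 + 2 * (e - 1)
    let t4 := 9 * elements + 2 + (e - 1)
    if e < elements - 1 then
      acc ++ [(15 + b, t1), (16 + b, t1 + 1), (17 + b, t1 + 2), (18 + b, t1 + 3),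
              (19 + b, t2), (20 + b, t2 + 1), (21 + b, t2 + 2),
              (22 + b, t3), (23 + b, t3 + 1),
              (24 + b, t4)]
    else
      acc ++ [(15 + b, t1), (16 + b, t1 + 1), (17 + b, t1 + 2),
              (18 + b, t2), (19 + b, t2 + 1),
              (20 + b, t3)]) items
  let items := items ++ [(14, elements * 10)]
  (PySem.Dict.ofList items).items

-- ===== PRECONDITION & SPEC =====
def Spec_four_tri_patch_hemisphere_remapper_py (elements : Int) (out : List (Int × Int)) : Prop := out = four_tri_patch_hemisphere_remapper_py_alt elements
instance (elements : Int) (out : List (Int × Int)) : Decidable (Spec_four_tri_patch_hemisphere_remapper_py elements out) := by unfold Spec_four_tri_patch_hemisphere_remapper_py; infer_instance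

-- ===== CLAIM (what is proved, stated in full; the proofs are below) =====
def Claim_equal_four_tri_patch_hemisphere_remapper_py : Prop := ∀ (elements : Int), Dom_four_tri_patch_hemisphere_remapper_py elements → Spec_four_tri_patch_hemisphere_remapper_py elements (four_tri_patch_hemisphere_remapper_py elements)

-- ===== LEMMAS AND PROOFS =====

-- canonical description of the produced association list
def pvFront (elements : Int) : List (Int × Int) :=
  [(0, 0), (1, 1), (2, 2), (3, 3), (4, 4),
   (5, elements * 4), (6, elements * 4 + 1), (7, elements * 4 + 2), (8, elements * 4 + 3),
   (9, elements * 4 + 3 * elements), (10, elements * 4 + 3 * elements + 1), (11, elements * 4 + 3 * elements + 2),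
   (12, elements * 4 + 3 * elements + 2 * elements), (13, elements * 4 + 3 * elements + 2 * elements + 1)]

def pvBlkI (elements e : Int) : List (Int × Int) :=
  [(15 + 10 * (e - 1), 5 + 4 * (e - 1)), (16 + 10 * (e - 1), 6 + 4 * (e - 1)),
   (17 + 10 * (e - 1), 7 + 4 * (e - 1)), (18 + 10 * (e - 1), 8 + 4 * (e - 1)),
   (19 + 10 * (e - 1), 4 * elements + 4 + 3 * (e - 1)), (20 + 10 * (e - 1), 4 * elements + 5 + 3 * (e - 1)),
   (21 + 10 * (e - 1), 4 * elements + 6 + 3 * (e - 1)),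
   (22 + 10 * (e - 1), 7 * elements + 3 + 2 * (e - 1)), (23 + 10 * (e - 1), 7 * elements + 4 + 2 * (e - 1)),
   (24 + 10 * (e - 1), 9 * elements + 2 + (e - 1))]

def pvBlkL (elements e : Int) : List (Int × Int) :=
  [(15 + 10 * (e - 1), 5 + 4 * (e - 1)), (16 + 10 * (e - 1), 6 + 4 * (e - 1)),
   (17 + 10 * (e - 1), 7 + 4 * (e - 1)),
   (18 + 10 * (e - 1), 4 * elements + 4 + 3 * (e - 1)), (19 + 10 * (e - 1), 4 * elements + 5 + 3 * (e - 1)),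
   (20 + 10 * (e - 1), 7 * elements + 3 + 2 * (e - 1))]

def pvBlk (elements e : Int) : List (Int × Int) :=
  if e < elements - 1 then pvBlkI elements e else pvBlkL elements e

def pvItems (elements : Int) : List (Int × Int) :=
  pvFront elements ++ (PySem.List.pyRange 1 elements).flatMap (pvBlk elements) ++ [(14, elements * 10)]

-- A's inner insert loop over fresh ascending keys appends to the dict's item list
lemma pvInner (len : Nat) : ∀ (d : PySem.Dict Int Int) (a n : Int),
    (∀ p ∈ d.items, p.1 < a) →
    (PySem.List.pyRange a (a + (len : Int))).foldl pvIns (d, n)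
      = (PySem.Dict.mk (d.items ++ (List.range len).map (fun (i : Nat) => (a + (i : Int), n + (i : Int)))), n + len) := by
  induction len with
  | zero =>
      intro d a n _
      have h0 : PySem.List.pyRange a (a + ((0 : Nat) : Int)) = [] := by
        simp [PySem.List.pyRange]
      rw [h0]
      simp
  | succ k ih =>
      intro d a n hb
      have hlt : a < a + ((k + 1 : Nat) : Int) := by push_cast; omega
      rw [PySem.List.pyRange_one_cons hlt]
      have hfresh : d.contains a = false := by
        rw [PySem.Dict.contains_eq_decide_mem_keys]
        simp only [decide_eq_false_iff_not, PySem.Dict.keys]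
        intro hmem
        rcases List.mem_map.mp hmem with ⟨p, hp, hpa⟩
        exact absurd (hpa ▸ hb p hp) (lt_irrefl a)
      have hins : d.insert a n = PySem.Dict.mk (d.items ++ [(a, n)]) := by
        apply PySem.Dict.ext
        rw [PySem.Dict.items_insert_of_not_contains d n hfresh]
      have harg : a + ((k + 1 : Nat) : Int) = (a + 1) + (k : Int) := by push_cast; omega
      simp only [List.foldl_cons, pvIns, harg, hins]
      have hb' : ∀ p ∈ (PySem.Dict.mk (d.items ++ [(a, n)])).items, p.1 < a + 1 := by
        intro p hp
        rcases List.mem_append.mp hp with h | h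
        · exact lt_trans (hb p h) (by omega)
        · rw [List.mem_singleton] at h; subst h; simp
      rw [ih (PySem.Dict.mk (d.items ++ [(a, n)])) (a + 1) (n + 1) hb']
      have hrange : (List.range (k + 1)).map (fun (i : Nat) => (a + (i : Int), n + (i : Int)))
          = (a, n) :: (List.range k).map (fun (i : Nat) => ((a + 1) + (i : Int), (n + 1) + (i : Int))) := by
        rw [List.range_succ_eq_map, List.map_cons, List.map_map]
        congr 1
        · norm_num
        · refine List.map_congr_left (fun i _ => ?_)
          simp only [Function.comp, Prod.mk.injEq]
          push_cast
          omega
      rw [hrange]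
      simp only [Prod.mk.injEq, List.append_assoc, List.cons_append,
        List.nil_append]
      refine ⟨trivial, by push_cast; ring⟩

-- small-length instances of pvInner, with the item lists written out
lemma pvInner5 (d : PySem.Dict Int Int) (a n : Int) (hb : ∀ p ∈ d.items, p.1 < a) :
    (PySem.List.pyRange a (a + 5)).foldl pvIns (d, n)
      = (PySem.Dict.mk (d.items ++ [(a, n), (a + 1, n + 1), (a + 2, n + 2), (a + 3, n + 3), (a + 4, n + 4)]), n + 5) := by
  have h := pvInner 5 d a n hb
  norm_num [List.range_succ] at h
  convert h using 2

lemma pvInner4 (d : PySem.Dict Int Int) (a n : Int) (hb : ∀ p ∈ d.items, p.1 < a) :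
    (PySem.List.pyRange a (a + 4)).foldl pvIns (d, n)
      = (PySem.Dict.mk (d.items ++ [(a, n), (a + 1, n + 1), (a + 2, n + 2), (a + 3, n + 3)]), n + 4) := by
  have h := pvInner 4 d a n hb
  norm_num [List.range_succ] at h
  convert h using 2

lemma pvInner3 (d : PySem.Dict Int Int) (a n : Int) (hb : ∀ p ∈ d.items, p.1 < a) :
    (PySem.List.pyRange a (a + 3)).foldl pvIns (d, n)
      = (PySem.Dict.mk (d.items ++ [(a, n), (a + 1, n + 1), (a + 2, n + 2)]), n + 3) := by
  have h := pvInner 3 d a n hb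
  norm_num [List.range_succ] at h
  convert h using 2

lemma pvInner2 (d : PySem.Dict Int Int) (a n : Int) (hb : ∀ p ∈ d.items, p.1 < a) :
    (PySem.List.pyRange a (a + 2)).foldl pvIns (d, n)
      = (PySem.Dict.mk (d.items ++ [(a, n), (a + 1, n + 1)]), n + 2) := by
  have h := pvInner 2 d a n hb
  norm_num [List.range_succ] at h
  convert h using 2

lemma pvInner1 (d : PySem.Dict Int Int) (a n : Int) (hb : ∀ p ∈ d.items, p.1 < a) :
    (PySem.List.pyRange a (a + 1)).foldl pvIns (d, n)
      = (PySem.Dict.mk (d.items ++ [(a, n)]), n + 1) := by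
  have h1 : PySem.List.pyRange a (a + 1) = [a] := by
    rw [PySem.List.pyRange_one_cons (by omega)]
    simp [PySem.List.pyRange]
  have hfresh : d.contains a = false := by
    rw [PySem.Dict.contains_eq_decide_mem_keys]
    simp only [decide_eq_false_iff_not, PySem.Dict.keys]
    intro hmem
    rcases List.mem_map.mp hmem with ⟨p, hp, hpa⟩
    exact absurd (hpa ▸ hb p hp) (lt_irrefl a)
  rw [h1]
  simp only [List.foldl_cons, List.foldl_nil, pvIns]
  rw [show d.insert a n = PySem.Dict.mk (d.items ++ [(a, n)]) from
    PySem.Dict.ext (PySem.Dict.items_insert_of_not_contains d n hfresh)]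

-- per-element block keys: Nodup and inside [15 + 10*(e-1), 24 + 10*(e-1)]
lemma pvBlk_keys (elements e : Int) :
    ((pvBlk elements e).map Prod.fst).Nodup ∧
      ∀ k ∈ (pvBlk elements e).map Prod.fst, 15 + 10 * (e - 1) ≤ k ∧ k ≤ 24 + 10 * (e - 1) := by
  unfold pvBlk pvBlkI pvBlkL
  split_ifs
  · exact ⟨by simp, by intro k hk; simp at hk; omega⟩
  · exact ⟨by simp, by intro k hk; simp at hk; omega⟩

lemma pvFront_bound (elements : Int) : ∀ p ∈ pvFront elements, p.1 < 14 := by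
  intro p hp
  fin_cases hp <;> norm_num

-- keys of the flatMap part: Nodup and in [15, 15 + 10*m)
lemma pvFlatKeys (elements : Int) (m : Nat) :
    ((((PySem.List.pyRange 1 (1 + (m : Int))).flatMap (pvBlk elements)).map Prod.fst).Nodup ∧
     ∀ k ∈ ((PySem.List.pyRange 1 (1 + (m : Int))).flatMap (pvBlk elements)).map Prod.fst, 15 ≤ k ∧ k < 15 + 10 * (m : Int)) := by
  induction m with
  | zero =>
      have h0 : PySem.List.pyRange 1 (1 + ((0 : Nat) : Int)) = [] := by
        simp [PySem.List.pyRange]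
      rw [h0]; simp
  | succ k ih =>
      have hsplit : PySem.List.pyRange 1 (1 + ((k + 1 : Nat) : Int))
          = PySem.List.pyRange 1 (1 + (k : Int)) ++ [1 + (k : Int)] := by
        have h1 : (1 + ((k + 1 : Nat) : Int)) = (1 + (k : Int)) + 1 := by push_cast; ring
        rw [h1, PySem.List.pyRange_one_succ_right (by omega)]
      rw [hsplit, List.flatMap_append, List.map_append]
      constructor
      · rw [List.nodup_append]
        refine ⟨ih.1, ?_, ?_⟩
        · simp only [List.flatMap_cons, List.flatMap_nil, List.append_nil]
          exact (pvBlk_keys elements (1 + (k : Int))).1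
        · intro x hx y hy
          have hb1 := ih.2 x hx
          simp only [List.flatMap_cons, List.flatMap_nil, List.append_nil] at hy
          have hb2 := (pvBlk_keys elements (1 + (k : Int))).2 y hy
          omega
      · intro x hx
        rcases List.mem_append.mp hx with h | h
        · have := ih.2 x h; push_cast; omega
        · simp only [List.flatMap_cons, List.flatMap_nil, List.append_nil] at h
          have := (pvBlk_keys elements (1 + (k : Int))).2 x h
          push_cast; omega

-- one interior iteration of A's main loop
lemma pvStepI (elements e : Int) (L : List (Int × Int))
    (hL : ∀ p ∈ L, p.1 < 15 + 10 * (e - 1)) (he : e < elements - 1) :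
    pvBodyA elements
      (PySem.Dict.mk L, 5 + 4 * (e - 1), 4 * elements + 4 + 3 * (e - 1),
       7 * elements + 3 + 2 * (e - 1), 9 * elements + 2 + (e - 1)) e
    = (PySem.Dict.mk (L ++ pvBlkI elements e), 5 + 4 * e, 4 * elements + 4 + 3 * e,
       7 * elements + 3 + 2 * e, 9 * elements + 2 + e) := by
  have h1 := pvInner4 (PySem.Dict.mk L) (15 + (e - 1) * 10) (5 + 4 * (e - 1))
    (by intro p hp; have := hL p hp; omega)
  have h2 := pvInner3 (PySem.Dict.mk (L ++
      [(15 + (e - 1) * 10, 5 + 4 * (e - 1)), (15 + (e - 1) * 10 + 1, 5 + 4 * (e - 1) + 1),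
       (15 + (e - 1) * 10 + 2, 5 + 4 * (e - 1) + 2), (15 + (e - 1) * 10 + 3, 5 + 4 * (e - 1) + 3)]))
    (19 + (e - 1) * 10) (4 * elements + 4 + 3 * (e - 1))
    (by intro p hp
        rcases List.mem_append.mp hp with h | h
        · have := hL p h; omega
        · obtain ⟨x, y⟩ := p; simp at h; dsimp only; omega)
  have h3 := pvInner2 (PySem.Dict.mk ((L ++
      [(15 + (e - 1) * 10, 5 + 4 * (e - 1)), (15 + (e - 1) * 10 + 1, 5 + 4 * (e - 1) + 1),
       (15 + (e - 1) * 10 + 2, 5 + 4 * (e - 1) + 2), (15 + (e - 1) * 10 + 3, 5 + 4 * (e - 1) + 3)]) ++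
      [(19 + (e - 1) * 10, 4 * elements + 4 + 3 * (e - 1)), (19 + (e - 1) * 10 + 1, 4 * elements + 4 + 3 * (e - 1) + 1),
       (19 + (e - 1) * 10 + 2, 4 * elements + 4 + 3 * (e - 1) + 2)]))
    (22 + (e - 1) * 10) (7 * elements + 3 + 2 * (e - 1))
    (by intro p hp
        rcases List.mem_append.mp hp with h | h
        · rcases List.mem_append.mp h with h' | h'
          · have := hL p h'; omega
          · obtain ⟨x, y⟩ := p; simp at h'; dsimp only; omega
        · obtain ⟨x, y⟩ := p; simp at h; dsimp only; omega)
  have h4 := pvInner1 (PySem.Dict.mk (((L ++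
      [(15 + (e - 1) * 10, 5 + 4 * (e - 1)), (15 + (e - 1) * 10 + 1, 5 + 4 * (e - 1) + 1),
       (15 + (e - 1) * 10 + 2, 5 + 4 * (e - 1) + 2), (15 + (e - 1) * 10 + 3, 5 + 4 * (e - 1) + 3)]) ++
      [(19 + (e - 1) * 10, 4 * elements + 4 + 3 * (e - 1)), (19 + (e - 1) * 10 + 1, 4 * elements + 4 + 3 * (e - 1) + 1),
       (19 + (e - 1) * 10 + 2, 4 * elements + 4 + 3 * (e - 1) + 2)]) ++
      [(22 + (e - 1) * 10, 7 * elements + 3 + 2 * (e - 1)), (22 + (e - 1) * 10 + 1, 7 * elements + 3 + 2 * (e - 1) + 1)]))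
    (24 + (e - 1) * 10) (9 * elements + 2 + (e - 1))
    (by intro p hp
        rcases List.mem_append.mp hp with h | h
        · rcases List.mem_append.mp h with h' | h'
          · rcases List.mem_append.mp h' with h'' | h''
            · have := hL p h''; omega
            · obtain ⟨x, y⟩ := p; simp at h''; dsimp only; omega
          · obtain ⟨x, y⟩ := p; simp at h'; dsimp only; omega
        · obtain ⟨x, y⟩ := p; simp at h; dsimp only; omega)
  simp only [pvBodyA, if_pos he, h1, h2, h3, h4]
  simp only [Prod.mk.injEq, PySem.Dict.mk.injEq, pvBlkI, List.append_assoc, List.cons_append,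
    List.nil_append, List.append_cancel_left_eq, List.cons.injEq, and_true]
  omega

-- the final iteration of A's main loop
lemma pvStepL (elements e : Int) (L : List (Int × Int)) (n4 : Int)
    (hL : ∀ p ∈ L, p.1 < 15 + 10 * (e - 1)) (he : ¬ e < elements - 1) :
    (pvBodyA elements
      (PySem.Dict.mk L, 5 + 4 * (e - 1), 4 * elements + 4 + 3 * (e - 1),
       7 * elements + 3 + 2 * (e - 1), n4) e).1
    = PySem.Dict.mk (L ++ pvBlkL elements e) := by
  have h1 := pvInner3 (PySem.Dict.mk L) (15 + (e - 1) * 10) (5 + 4 * (e - 1))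
    (by intro p hp; have := hL p hp; omega)
  have hr2 : (19 + (e - 1) * 10 + 1 : Int) = (19 + (e - 1) * 10 - 1) + 2 := by ring
  have h2 := pvInner2 (PySem.Dict.mk (L ++
      [(15 + (e - 1) * 10, 5 + 4 * (e - 1)), (15 + (e - 1) * 10 + 1, 5 + 4 * (e - 1) + 1),
       (15 + (e - 1) * 10 + 2, 5 + 4 * (e - 1) + 2)]))
    (19 + (e - 1) * 10 - 1) (4 * elements + 4 + 3 * (e - 1))
    (by intro p hp
        rcases List.mem_append.mp hp with h | h
        · have := hL p h; omega
        · obtain ⟨x, y⟩ := p; simp at h; dsimp only; omega)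
  have hr3 : (22 + (e - 1) * 10 - 1 : Int) = (22 + (e - 1) * 10 - 2) + 1 := by ring
  have h3 := pvInner1 (PySem.Dict.mk ((L ++
      [(15 + (e - 1) * 10, 5 + 4 * (e - 1)), (15 + (e - 1) * 10 + 1, 5 + 4 * (e - 1) + 1),
       (15 + (e - 1) * 10 + 2, 5 + 4 * (e - 1) + 2)]) ++
      [(19 + (e - 1) * 10 - 1, 4 * elements + 4 + 3 * (e - 1)), (19 + (e - 1) * 10 - 1 + 1, 4 * elements + 4 + 3 * (e - 1) + 1)]))
    (22 + (e - 1) * 10 - 2) (7 * elements + 3 + 2 * (e - 1))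
    (by intro p hp
        rcases List.mem_append.mp hp with h | h
        · rcases List.mem_append.mp h with h' | h'
          · have := hL p h'; omega
          · obtain ⟨x, y⟩ := p; simp at h'; dsimp only; omega
        · obtain ⟨x, y⟩ := p; simp at h; dsimp only; omega)
  simp only [pvBodyA, if_neg he, hr2, hr3, h1, h2, h3]
  simp only [Prod.mk.injEq, PySem.Dict.mk.injEq, pvBlkL, List.append_assoc, List.cons_append,
    List.nil_append, List.append_cancel_left_eq, List.cons.injEq, and_true]
  omega

-- A's main loop over the interior elements
lemma pvMainA (elements : Int) : ∀ (m : Nat), (m : Int) ≤ elements - 2 →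
    (PySem.List.pyRange 1 (1 + (m : Int))).foldl (pvBodyA elements)
      (PySem.Dict.mk (pvFront elements), (5 : Int), 4 * elements + 4, 7 * elements + 3, 9 * elements + 2)
    = (PySem.Dict.mk (pvFront elements ++ (PySem.List.pyRange 1 (1 + (m : Int))).flatMap (pvBlk elements)),
       5 + 4 * (m : Int), 4 * elements + 4 + 3 * (m : Int), 7 * elements + 3 + 2 * (m : Int), 9 * elements + 2 + (m : Int)) := by
  intro m
  induction m with
  | zero =>
      intro _
      have h0 : PySem.List.pyRange 1 (1 + ((0 : Nat) : Int)) = [] := by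
        simp [PySem.List.pyRange]
      rw [h0]; simp
  | succ k ih =>
      intro hm
      have hk : (k : Int) ≤ elements - 2 := by push_cast at hm; omega
      have hsplit : PySem.List.pyRange 1 (1 + ((k + 1 : Nat) : Int))
          = PySem.List.pyRange 1 (1 + (k : Int)) ++ [1 + (k : Int)] := by
        have h1 : (1 + ((k + 1 : Nat) : Int)) = (1 + (k : Int)) + 1 := by push_cast; ring
        rw [h1, PySem.List.pyRange_one_succ_right (by omega)]
      rw [hsplit, List.foldl_append, ih hk]
      simp only [List.foldl_cons, List.foldl_nil]
      have hL : ∀ p ∈ pvFront elements ++ (PySem.List.pyRange 1 (1 + (k : Int))).flatMap (pvBlk elements),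
          p.1 < 15 + 10 * ((1 + (k : Int)) - 1) := by
        intro p hp
        rcases List.mem_append.mp hp with h | h
        · have := pvFront_bound elements p h; omega
        · have := (pvFlatKeys elements k).2 p.1 (List.mem_map_of_mem h)
          omega
      have hstate : ((5 : Int) + 4 * (k : Int), 4 * elements + 4 + 3 * (k : Int),
            7 * elements + 3 + 2 * (k : Int), 9 * elements + 2 + (k : Int))
          = (5 + 4 * ((1 + (k : Int)) - 1), 4 * elements + 4 + 3 * ((1 + (k : Int)) - 1),
             7 * elements + 3 + 2 * ((1 + (k : Int)) - 1), 9 * elements + 2 + ((1 + (k : Int)) - 1)) := by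
        norm_num
      rw [hstate, pvStepI elements (1 + (k : Int)) _ hL (by omega)]
      have hblk : pvBlk elements (1 + (k : Int)) = pvBlkI elements (1 + (k : Int)) := by
        unfold pvBlk; rw [if_pos (by omega)]
      rw [List.flatMap_append]
      simp only [List.flatMap_cons, List.flatMap_nil, List.append_nil, List.append_assoc, hblk,
        Prod.mk.injEq]
      refine ⟨trivial, by push_cast; ring, by push_cast; ring, by push_cast; ring, by push_cast; ring⟩

lemma pvA_eq (elements : Int) : four_tri_patch_hemisphere_remapper_py elements = pvItems elements := by
  have h1 : List.foldl pvIns (PySem.Dict.empty, 0) (PySem.List.pyRange 0 (0 + 5))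
      = (PySem.Dict.mk [(0, 0), (1, 1), (2, 2), (3, 3), (4, 4)], 5) := by
    simpa [PySem.Dict.empty] using pvInner5 PySem.Dict.empty 0 0 (by simp [PySem.Dict.empty])
  have h2 : List.foldl pvIns (PySem.Dict.mk [(0, 0), (1, 1), (2, 2), (3, 3), (4, 4)], elements * 4)
        (PySem.List.pyRange 5 (5 + 4))
      = (PySem.Dict.mk [(0, 0), (1, 1), (2, 2), (3, 3), (4, 4), (5, elements * 4), (6, elements * 4 + 1),
          (7, elements * 4 + 2), (8, elements * 4 + 3)], elements * 4 + 4) := by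
    simpa using pvInner4 (PySem.Dict.mk [(0, 0), (1, 1), (2, 2), (3, 3), (4, 4)]) 5 (elements * 4)
      (by intro p hp; obtain ⟨x, y⟩ := p; simp at hp; dsimp only; omega)
  have h3 : List.foldl pvIns (PySem.Dict.mk [(0, 0), (1, 1), (2, 2), (3, 3), (4, 4), (5, elements * 4),
          (6, elements * 4 + 1), (7, elements * 4 + 2), (8, elements * 4 + 3)], elements * 4 + 3 * elements)
        (PySem.List.pyRange 9 (9 + 3))
      = (PySem.Dict.mk [(0, 0), (1, 1), (2, 2), (3, 3), (4, 4), (5, elements * 4), (6, elements * 4 + 1),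
          (7, elements * 4 + 2), (8, elements * 4 + 3), (9, elements * 4 + 3 * elements),
          (10, elements * 4 + 3 * elements + 1), (11, elements * 4 + 3 * elements + 2)],
         elements * 4 + 3 * elements + 3) := by
    simpa using pvInner3 (PySem.Dict.mk [(0, 0), (1, 1), (2, 2), (3, 3), (4, 4), (5, elements * 4),
        (6, elements * 4 + 1), (7, elements * 4 + 2), (8, elements * 4 + 3)]) 9 (elements * 4 + 3 * elements)
      (by intro p hp; obtain ⟨x, y⟩ := p; simp at hp; dsimp only; omega)
  have h4 : List.foldl pvIns (PySem.Dict.mk [(0, 0), (1, 1), (2, 2), (3, 3), (4, 4), (5, elements * 4),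
          (6, elements * 4 + 1), (7, elements * 4 + 2), (8, elements * 4 + 3), (9, elements * 4 + 3 * elements),
          (10, elements * 4 + 3 * elements + 1), (11, elements * 4 + 3 * elements + 2)],
          elements * 4 + 3 * elements + 2 * elements)
        (PySem.List.pyRange 12 (12 + 2))
      = (PySem.Dict.mk (pvFront elements), elements * 4 + 3 * elements + 2 * elements + 2) := by
    simpa [pvFront] using pvInner2 (PySem.Dict.mk [(0, 0), (1, 1), (2, 2), (3, 3), (4, 4), (5, elements * 4),
        (6, elements * 4 + 1), (7, elements * 4 + 2), (8, elements * 4 + 3), (9, elements * 4 + 3 * elements),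
        (10, elements * 4 + 3 * elements + 1), (11, elements * 4 + 3 * elements + 2)]) 12
        (elements * 4 + 3 * elements + 2 * elements)
      (by intro p hp; obtain ⟨x, y⟩ := p; simp at hp; dsimp only; omega)
  simp only [four_tri_patch_hemisphere_remapper_py, h1, h2, h3, h4]
  have hini : ((PySem.Dict.mk (pvFront elements), (5 : Int), elements * 4 + 4, elements * 4 + 3 * elements + 3,
        elements * 4 + 3 * elements + 2 * elements + 2) :
        PySem.Dict Int Int × Int × Int × Int × Int)
      = (PySem.Dict.mk (pvFront elements), 5, 4 * elements + 4, 7 * elements + 3, 9 * elements + 2) := by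
    simp only [Prod.mk.injEq]
    refine ⟨trivial, trivial, by ring, by ring, by ring⟩
  rw [hini]
  rcases lt_or_ge elements 2 with hlt | hge
  · -- no interior loop: elements ≤ 1
    have hnil : PySem.List.pyRange 1 elements = [] := by
      simp [PySem.List.pyRange]; omega
    rw [hnil]
    simp only [List.foldl_nil]
    have hc : (PySem.Dict.mk (pvFront elements)).contains 14 = false := by
      rw [PySem.Dict.contains_eq_decide_mem_keys]
      simp only [decide_eq_false_iff_not, PySem.Dict.keys]
      intro hmem
      rcases List.mem_map.mp hmem with ⟨p, hp, hpa⟩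
      have := pvFront_bound elements p hp
      omega
    rw [show (PySem.Dict.mk (pvFront elements)).insert 14 (elements * 10)
          = PySem.Dict.mk (pvFront elements ++ [(14, elements * 10)]) from
        PySem.Dict.ext (PySem.Dict.items_insert_of_not_contains _ _ hc)]
    simp [pvItems, hnil]
  · -- elements ≥ 2
    obtain ⟨m, rfl⟩ : ∃ m : Nat, elements = (m : Int) + 2 := ⟨(elements - 2).toNat, by omega⟩
    have hsplit : PySem.List.pyRange 1 ((m : Int) + 2)
        = PySem.List.pyRange 1 (1 + (m : Int)) ++ [1 + (m : Int)] := by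
      have h := PySem.List.pyRange_one_succ_right (a := 1) (b := 1 + (m : Int)) (by omega)
      rw [show (1 + (m : Int)) + 1 = (m : Int) + 2 from by ring] at h
      exact h
    rw [hsplit, List.foldl_append, pvMainA ((m : Int) + 2) m (by omega)]
    simp only [List.foldl_cons, List.foldl_nil]
    have hstate : ((PySem.Dict.mk (pvFront ((m : Int) + 2) ++
            (PySem.List.pyRange 1 (1 + (m : Int))).flatMap (pvBlk ((m : Int) + 2))),
          5 + 4 * (m : Int), 4 * ((m : Int) + 2) + 4 + 3 * (m : Int),
          7 * ((m : Int) + 2) + 3 + 2 * (m : Int), 9 * ((m : Int) + 2) + 2 + (m : Int)) :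
          PySem.Dict Int Int × Int × Int × Int × Int)
        = (PySem.Dict.mk (pvFront ((m : Int) + 2) ++
            (PySem.List.pyRange 1 (1 + (m : Int))).flatMap (pvBlk ((m : Int) + 2))),
          5 + 4 * ((1 + (m : Int)) - 1), 4 * ((m : Int) + 2) + 4 + 3 * ((1 + (m : Int)) - 1),
          7 * ((m : Int) + 2) + 3 + 2 * ((1 + (m : Int)) - 1), 9 * ((m : Int) + 2) + 2 + (m : Int)) := by
      simp only [Prod.mk.injEq]
      refine ⟨trivial, by ring, by ring, by ring, trivial⟩
    rw [hstate]
    have hL : ∀ p ∈ pvFront ((m : Int) + 2) ++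
        (PySem.List.pyRange 1 (1 + (m : Int))).flatMap (pvBlk ((m : Int) + 2)),
        p.1 < 15 + 10 * ((1 + (m : Int)) - 1) := by
      intro p hp
      rcases List.mem_append.mp hp with h | h
      · have := pvFront_bound _ p h; omega
      · have := (pvFlatKeys ((m : Int) + 2) m).2 p.1 (List.mem_map_of_mem h)
        omega
    rw [pvStepL ((m : Int) + 2) (1 + (m : Int)) _ _ hL (by omega)]
    have hblkL : pvBlk ((m : Int) + 2) (1 + (m : Int)) = pvBlkL ((m : Int) + 2) (1 + (m : Int)) := by
      unfold pvBlk; rw [if_neg (by omega)]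
    have hc : (PySem.Dict.mk ((pvFront ((m : Int) + 2) ++
        (PySem.List.pyRange 1 (1 + (m : Int))).flatMap (pvBlk ((m : Int) + 2))) ++
        pvBlkL ((m : Int) + 2) (1 + (m : Int)))).contains 14 = false := by
      rw [PySem.Dict.contains_eq_decide_mem_keys]
      simp only [decide_eq_false_iff_not, PySem.Dict.keys]
      intro hmem
      rcases List.mem_map.mp hmem with ⟨p, hp, hpa⟩
      rcases List.mem_append.mp hp with h | h
      · rcases List.mem_append.mp h with h' | h'
        · have := pvFront_bound _ p h'; omega
        · have := (pvFlatKeys ((m : Int) + 2) m).2 p.1 (List.mem_map_of_mem h')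
          omega
      · have := (pvBlk_keys ((m : Int) + 2) (1 + (m : Int))).2 p.1
          (by rw [hblkL]; exact List.mem_map_of_mem h)
        omega
    rw [show (PySem.Dict.mk ((pvFront ((m : Int) + 2) ++
          (PySem.List.pyRange 1 (1 + (m : Int))).flatMap (pvBlk ((m : Int) + 2))) ++
          pvBlkL ((m : Int) + 2) (1 + (m : Int)))).insert 14 (((m : Int) + 2) * 10)
        = PySem.Dict.mk (((pvFront ((m : Int) + 2) ++
          (PySem.List.pyRange 1 (1 + (m : Int))).flatMap (pvBlk ((m : Int) + 2))) ++
          pvBlkL ((m : Int) + 2) (1 + (m : Int))) ++ [(14, ((m : Int) + 2) * 10)]) from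
      PySem.Dict.ext (PySem.Dict.items_insert_of_not_contains _ _ hc)]
    unfold pvItems
    rw [hsplit, List.flatMap_append]
    simp [hblkL, List.append_assoc]

lemma pvItems_keys_nodup (elements : Int) : ((pvItems elements).map Prod.fst).Nodup := by
  unfold pvItems
  have hm : PySem.List.pyRange 1 elements = PySem.List.pyRange 1 (1 + (((elements - 1).toNat) : Int)) := by
    rcases (by omega : 1 ≤ elements ∨ elements < 1) with h | h
    · rw [Int.toNat_of_nonneg (by omega : (0 : Int) ≤ elements - 1)]
      congr 1
      ring
    · rw [show (elements - 1).toNat = 0 from by omega]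
      norm_num
      simp [PySem.List.pyRange]
      omega
  rw [hm]
  have hfk := pvFlatKeys elements ((elements - 1).toNat)
  have hfr : (pvFront elements).map Prod.fst = [0, 1, 2, 3, 4, 5, 6, 7, 8, 9, 10, 11, 12, 13] := by
    simp [pvFront]
  simp only [List.map_append, List.nodup_append]
  refine ⟨⟨?_, hfk.1, ?_⟩, by simp, ?_⟩
  · rw [hfr]; decide
  · intro a ha b hb
    rw [hfr] at ha
    have := hfk.2 b hb
    fin_cases ha <;> omega
  · intro a ha b hb
    simp at hb
    subst hb
    rcases List.mem_append.mp ha with h | h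
    · rw [hfr] at h; fin_cases h <;> omega
    · have := hfk.2 a h; omega

lemma pvB_eq (elements : Int) : four_tri_patch_hemisphere_remapper_py_alt elements = pvItems elements := by
  have hbody : (fun (acc : List (Int × Int)) (e : Int) =>
      if e < elements - 1 then
        acc ++ [(15 + 10 * (e - 1), 5 + 4 * (e - 1)), (16 + 10 * (e - 1), 5 + 4 * (e - 1) + 1),
                (17 + 10 * (e - 1), 5 + 4 * (e - 1) + 2), (18 + 10 * (e - 1), 5 + 4 * (e - 1) + 3),
                (19 + 10 * (e - 1), 4 * elements + 4 + 3 * (e - 1)),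
                (20 + 10 * (e - 1), 4 * elements + 4 + 3 * (e - 1) + 1),
                (21 + 10 * (e - 1), 4 * elements + 4 + 3 * (e - 1) + 2),
                (22 + 10 * (e - 1), 7 * elements + 3 + 2 * (e - 1)),
                (23 + 10 * (e - 1), 7 * elements + 3 + 2 * (e - 1) + 1),
                (24 + 10 * (e - 1), 9 * elements + 2 + (e - 1))]
      else
        acc ++ [(15 + 10 * (e - 1), 5 + 4 * (e - 1)), (16 + 10 * (e - 1), 5 + 4 * (e - 1) + 1),
                (17 + 10 * (e - 1), 5 + 4 * (e - 1) + 2),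
                (18 + 10 * (e - 1), 4 * elements + 4 + 3 * (e - 1)),
                (19 + 10 * (e - 1), 4 * elements + 4 + 3 * (e - 1) + 1),
                (20 + 10 * (e - 1), 7 * elements + 3 + 2 * (e - 1))])
      = fun acc e => acc ++ pvBlk elements e := by
    funext acc e
    unfold pvBlk pvBlkI pvBlkL
    split_ifs
    · simp only [List.append_cancel_left_eq, List.cons.injEq, Prod.mk.injEq, and_true, true_and]
      omega
    · simp only [List.append_cancel_left_eq, List.cons.injEq, Prod.mk.injEq, and_true, true_and]
      omega
  have hfront : ([(0, 0), (1, 1), (2, 2), (3, 3), (4, 4),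
        (5, 4 * elements), (6, 4 * elements + 1), (7, 4 * elements + 2), (8, 4 * elements + 3),
        (9, 7 * elements), (10, 7 * elements + 1), (11, 7 * elements + 2),
        (12, 9 * elements), (13, 9 * elements + 1)] : List (Int × Int))
      = pvFront elements := by
    simp only [pvFront, List.cons.injEq, Prod.mk.injEq, and_true, true_and]
    omega
  simp only [four_tri_patch_hemisphere_remapper_py_alt]
  rw [hbody, PySem.List.foldl_append_eq_flatMap, hfront]
  have hres := PySem.Dict.items_foldl_insert_fresh
    (pvItems elements) Prod.fst Prod.snd PySem.Dict.empty
    (fun a _ => PySem.Dict.contains_empty a.1) (pvItems_keys_nodup elements)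
  show (PySem.Dict.ofList (pvItems elements)).items = pvItems elements
  simp only [PySem.Dict.ofList, PySem.Dict.update]
  rw [hres]
  simp [PySem.Dict.empty]

-- ===== VERDICT (by name: the statement is the Claim_ definition above) =====
theorem four_tri_patch_hemisphere_remapper_py_spec : Claim_equal_four_tri_patch_hemisphere_remapper_py := by
  intro elements _
  unfold Spec_four_tri_patch_hemisphere_remapper_py
  rw [pvA_eq, pvB_eq]
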